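-- pv_equiv track=rewrite | github.com/grapheneaffiliate/h4-polytopic-attention | solve_batch20.py | solve_ce22a75a
-- ===== SOURCE A (Python) =====
-- def solve_ce22a75a(grid):
--     h, w = len(grid), len(grid[0])
--     out = [[0]*w for _ in range(h)]
--     for r in range(h):
--         for c in range(w):
--             if grid[r][c] == 5:
--                 br = (r // 3) * 3
--                 bc = (c // 3) * 3
--                 for dr in range(3):
--                     for dc in range(3):
--                         out[br+dr][bc+dc] = 1
--     return out
-- ===== SOURCE B (Python) =====
-- def solve_ce22a75a(grid):
--     h, w = len(grid), len(grid[0])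
--     bh, bw = (h + 2) // 3, (w + 2) // 3
--     flag = [[any(grid[r][c] == 5
--                  for r in range(i * 3, min(i * 3 + 3, h))
--                  for c in range(j * 3, min(j * 3 + 3, w)))
--              for j in range(bw)]
--             for i in range(bh)]
--     return [[1 if flag[r // 3][c // 3] else 0 for c in range(w)] for r in range(h)]
-- ===== Notes on version B (the rewrite author's own statement) =====
-- stated objective: alternative
-- what changed: B is pull-based and mutation-free: it precomputes a bh x bw boolean table saying which 3x3 block contains a 5 (scanning each block once, clamped to the grid), then builds the output purely by comprehension out[r][c] = 1 if flag[r//3][c//3] else 0, instead of A's push-based scan that overwrites 3x3 regions of a zero grid for every 5 found.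
import Mathlib
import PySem

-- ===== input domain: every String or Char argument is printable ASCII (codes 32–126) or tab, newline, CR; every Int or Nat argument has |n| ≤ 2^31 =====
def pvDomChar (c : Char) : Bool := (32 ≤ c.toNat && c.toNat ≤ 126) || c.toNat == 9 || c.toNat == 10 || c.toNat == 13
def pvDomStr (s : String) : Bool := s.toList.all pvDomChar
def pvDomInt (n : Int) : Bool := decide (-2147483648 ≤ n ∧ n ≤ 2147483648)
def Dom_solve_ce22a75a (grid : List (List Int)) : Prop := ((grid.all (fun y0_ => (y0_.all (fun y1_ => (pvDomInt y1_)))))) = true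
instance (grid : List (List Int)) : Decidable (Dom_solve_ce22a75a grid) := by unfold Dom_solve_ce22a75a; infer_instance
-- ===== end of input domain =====

-- B is pull-based and mutation-free: it precomputes a block-flag table (which 3x3 block contains
-- a 5, scan clamped to the grid) and builds the output purely by per-cell lookup; equal return
-- values wherever A returns.

-- ===== PORT A =====
-- the Python statement 'out[i][j] = v' (in-bounds under Pre_)
def pvSet2 (g : List (List Int)) (i j : Nat) (v : Int) : List (List Int) :=
  g.modify i (fun row => row.set j v)

def solve_ce22a75a (grid : List (List Int)) : List (List Int) :=
  let h := grid.length
  let w := (grid.getD 0 []).length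
  let out0 := (List.range h).map (fun _ => List.replicate w (0 : Int))
  (List.range h).foldl (fun out r =>
    (List.range w).foldl (fun out c =>
      if (grid.getD r []).getD c 0 = 5 then
        let br := (r / 3) * 3
        let bc := (c / 3) * 3
        (List.range 3).foldl (fun o dr =>
          (List.range 3).foldl (fun o dc => pvSet2 o (br + dr) (bc + dc) 1) o) out
      else out) out) out0

-- ===== PORT B =====
def solve_ce22a75a_alt (grid : List (List Int)) : List (List Int) :=
  let h := grid.length
  let w := (grid.getD 0 []).length
  let bh := (h + 2) / 3
  let bw := (w + 2) / 3
  -- range(i*3, min(i*3+3, h)) ported as List.range' (i*3) (min (i*3+3) h - i*3)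
  let flag := (List.range bh).map (fun i =>
    (List.range bw).map (fun j =>
      (List.range' (i * 3) (min (i * 3 + 3) h - i * 3)).any (fun r =>
        (List.range' (j * 3) (min (j * 3 + 3) w - j * 3)).any (fun c =>
          (grid.getD r []).getD c 0 == 5))))
  (List.range h).map (fun r =>
    (List.range w).map (fun c =>
      if (flag.getD (r / 3) []).getD (c / 3) false then (1 : Int) else 0))

-- ===== PRECONDITION & SPEC =====
-- Pre_ is exactly the inputs on which A returns: the grid is nonempty, no row is shorter than the
-- first row (else grid[r][c] raises IndexError), and every 5 lies in a 3x3 block that fits inside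
-- the h x w area (else out[br+dr][bc+dc] raises IndexError).
def Pre_solve_ce22a75a (grid : List (List Int)) : Prop :=
  grid ≠ [] ∧
  (∀ row ∈ grid, (grid.getD 0 []).length ≤ row.length) ∧
  (∀ r < grid.length, ∀ c < (grid.getD 0 []).length,
    (grid.getD r []).getD c 0 = 5 →
      (r / 3) * 3 + 3 ≤ grid.length ∧ (c / 3) * 3 + 3 ≤ (grid.getD 0 []).length)
instance (grid : List (List Int)) : Decidable (Pre_solve_ce22a75a grid) := by
  unfold Pre_solve_ce22a75a; infer_instance

def pvWitness_solve_ce22a75a : List (List Int) := [[5, 0, 0], [0, 0, 0], [0, 0, 0]]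

def Spec_solve_ce22a75a (grid : List (List Int)) (out : List (List Int)) : Prop := out = solve_ce22a75a_alt grid
instance (grid : List (List Int)) (out : List (List Int)) : Decidable (Spec_solve_ce22a75a grid out) := by unfold Spec_solve_ce22a75a; infer_instance

-- ===== CLAIM (what is proved, stated in full; the proofs are below) =====
def Claim_equal_solve_ce22a75a : Prop := ∀ (grid : List (List Int)), Dom_solve_ce22a75a grid → Pre_solve_ce22a75a grid → Spec_solve_ce22a75a grid (solve_ce22a75a grid)

-- ===== LEMMAS AND PROOFS =====

-- fill the 3x3 block anchored at p with 1s (A's inner double loop, abstracted for the proof)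
def pvFill (out : List (List Int)) (p : Nat × Nat) : List (List Int) :=
  (List.range 3).foldl (fun o dr =>
    (List.range 3).foldl (fun o dc => pvSet2 o (p.1 + dr) (p.2 + dc) 1) o) out

-- the block anchors of all 5-cells, in scan order
def pvAnchors (grid : List (List Int)) : List (Nat × Nat) :=
  (List.range grid.length).flatMap (fun r =>
    ((List.range (grid.getD 0 []).length).filter
        (fun c => (grid.getD r []).getD c 0 = 5)).map
      (fun c => ((r / 3) * 3, (c / 3) * 3)))

def pvOut0 (H W : Nat) : List (List Int) :=
  (List.range H).map (fun _ => List.replicate W (0 : Int))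

def pvShape (g : List (List Int)) (H W : Nat) : Prop :=
  g.length = H ∧ ∀ (a : Nat) (row : List Int), g[a]? = some row → row.length = W

def pvCell (g : List (List Int)) (a b : Nat) : Option Int := g[a]? >>= fun row => row[b]?

abbrev pvCover (p : Nat × Nat) (a b : Nat) : Prop :=
  p.1 ≤ a ∧ a < p.1 + 3 ∧ p.2 ≤ b ∧ b < p.2 + 3

theorem pvShape_out0 (H W : Nat) : pvShape (pvOut0 H W) H W := by
  constructor
  · simp [pvOut0]
  · intro a row hrow
    rw [pvOut0, List.getElem?_map] at hrow
    cases h : (List.range H)[a]? with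
    | none => rw [h] at hrow; simp at hrow
    | some v => rw [h] at hrow; simp at hrow; rw [← hrow]; simp

theorem pvShape_set2 {g : List (List Int)} {H W : Nat} (hs : pvShape g H W) (i j : Nat) (v : Int) :
    pvShape (pvSet2 g i j v) H W := by
  refine ⟨by simp [pvSet2, hs.1], ?_⟩
  intro a row hrow
  rw [pvSet2, List.getElem?_modify] at hrow
  cases hg : g[a]? with
  | none => rw [hg] at hrow; simp at hrow
  | some r =>
    rw [hg] at hrow
    by_cases hia : i = a
    · simp [hia] at hrow
      rw [← hrow]
      simpa using hs.2 a r hg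
    · simp [hia] at hrow
      rw [← hrow]
      exact hs.2 a r hg

theorem pvCell_set2 {g : List (List Int)} {H W : Nat} (hs : pvShape g H W) {i j : Nat}
    (hi : i < H) (hj : j < W) (v : Int) (a b : Nat) :
    pvCell (pvSet2 g i j v) a b = if a = i ∧ b = j then some v else pvCell g a b := by
  unfold pvCell pvSet2
  rw [List.getElem?_modify]
  cases hg : g[a]? with
  | none =>
    have hlen : g.length ≤ a := List.getElem?_eq_none_iff.mp hg
    have hai : ¬ (a = i ∧ b = j) := by
      rintro ⟨rfl, -⟩
      have := hs.1
      omega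
    rw [if_neg hai]
    simp
  | some r =>
    have hrw : r.length = W := hs.2 a r hg
    by_cases hia : a = i
    · subst hia
      have hjr : j < r.length := by omega
      by_cases hbj : b = j
      · subst hbj
        simp [hjr]
      · have hjb : ¬ j = b := fun h => hbj h.symm
        simp [hjb, hbj]
    · have hni : ¬ i = a := fun h => hia h.symm
      simp [hia, hni]

theorem pvRow_shape {g : List (List Int)} {H W : Nat} (hs : pvShape g H W)
    {i q : Nat} (n : Nat) :
    pvShape ((List.range n).foldl (fun o dc => pvSet2 o i (q + dc) 1) g) H W := by
  induction n with
  | zero => simpa using hs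
  | succ m ih =>
    rw [List.range_succ, List.foldl_append, List.foldl_cons, List.foldl_nil]
    exact pvShape_set2 ih _ _ _

theorem pvRow_cell {g : List (List Int)} {H W : Nat} (hs : pvShape g H W) {i q : Nat}
    (n : Nat) (hi : i < H) (hq : q + n ≤ W) (a b : Nat) :
    pvCell ((List.range n).foldl (fun o dc => pvSet2 o i (q + dc) 1) g) a b
      = if a = i ∧ q ≤ b ∧ b < q + n then some 1 else pvCell g a b := by
  induction n with
  | zero => simp
  | succ m ih =>
    rw [List.range_succ, List.foldl_append, List.foldl_cons, List.foldl_nil]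
    rw [pvCell_set2 (pvRow_shape hs m) hi (by omega) 1 a b]
    rw [ih (by omega)]
    split_ifs <;> first | rfl | omega

theorem pvBlock_shape {g : List (List Int)} {H W : Nat} (hs : pvShape g H W)
    {p : Nat × Nat} (m : Nat) :
    pvShape ((List.range m).foldl (fun o dr =>
      (List.range 3).foldl (fun o dc => pvSet2 o (p.1 + dr) (p.2 + dc) 1) o) g) H W := by
  induction m with
  | zero => simpa using hs
  | succ k ih =>
    rw [show List.range (k + 1) = List.range k ++ [k] from List.range_succ,
        List.foldl_append, List.foldl_cons, List.foldl_nil]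
    exact pvRow_shape ih 3

theorem pvBlock_cell {g : List (List Int)} {H W : Nat} (hs : pvShape g H W)
    {p : Nat × Nat} (m : Nat) (hm : p.1 + m ≤ H) (h2 : p.2 + 3 ≤ W) (a b : Nat) :
    pvCell ((List.range m).foldl (fun o dr =>
        (List.range 3).foldl (fun o dc => pvSet2 o (p.1 + dr) (p.2 + dc) 1) o) g) a b
      = if p.1 ≤ a ∧ a < p.1 + m ∧ p.2 ≤ b ∧ b < p.2 + 3 then some 1 else pvCell g a b := by
  induction m with
  | zero =>
    simp only [List.range_zero, List.foldl_nil]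
    have hno : ¬ (p.1 ≤ a ∧ a < p.1 + 0 ∧ p.2 ≤ b ∧ b < p.2 + 3) := by omega
    rw [if_neg hno]
  | succ k ih =>
    rw [show List.range (k + 1) = List.range k ++ [k] from List.range_succ,
        List.foldl_append, List.foldl_cons, List.foldl_nil]
    rw [pvRow_cell (pvBlock_shape hs k) 3 (by omega) (by omega)]
    rw [ih (by omega)]
    split_ifs <;> first | rfl | omega

theorem pvFill_shape {g : List (List Int)} {H W : Nat} (hs : pvShape g H W) (p : Nat × Nat) :
    pvShape (pvFill g p) H W := by
  unfold pvFill
  exact pvBlock_shape hs 3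

theorem pvFill_cell {g : List (List Int)} {H W : Nat} (hs : pvShape g H W) {p : Nat × Nat}
    (h1 : p.1 + 3 ≤ H) (h2 : p.2 + 3 ≤ W) (a b : Nat) :
    pvCell (pvFill g p) a b = if pvCover p a b then some 1 else pvCell g a b := by
  unfold pvFill
  rw [pvBlock_cell hs 3 h1 h2 a b]

theorem pvFoldl_fill_shape {L : List (Nat × Nat)} {g : List (List Int)} {H W : Nat}
    (hs : pvShape g H W) : pvShape (L.foldl pvFill g) H W := by
  induction L generalizing g with
  | nil => exact hs
  | cons p L ih => exact ih (pvFill_shape hs p)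

theorem pvFoldl_fill_cell {L : List (Nat × Nat)} {g : List (List Int)} {H W : Nat}
    (hs : pvShape g H W) (hL : ∀ p ∈ L, p.1 + 3 ≤ H ∧ p.2 + 3 ≤ W) (a b : Nat) :
    pvCell (L.foldl pvFill g) a b
      = if ∃ p ∈ L, pvCover p a b then some 1 else pvCell g a b := by
  induction L generalizing g with
  | nil => simp
  | cons p L ih =>
    rw [List.foldl_cons,
        ih (pvFill_shape hs p) (fun q hq => hL q (List.mem_cons_of_mem p hq)),
        pvFill_cell hs (hL p List.mem_cons_self).1 (hL p List.mem_cons_self).2]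
    have hcons : (∃ q ∈ p :: L, pvCover q a b) ↔ (pvCover p a b ∨ ∃ q ∈ L, pvCover q a b) := by
      simp [List.mem_cons, or_and_right, exists_or]
    simp only [hcons]
    by_cases hL1 : ∃ q ∈ L, pvCover q a b <;> by_cases hp1 : pvCover p a b <;>
      simp [hL1, hp1]

theorem pvFoldl_foldl_eq_foldl_flatMap {α β γ : Type} (F : α → List β) (f : γ → β → γ) :
    ∀ (ls : List α) (init : γ),
      ls.foldl (fun acc x => (F x).foldl f acc) init = (ls.flatMap F).foldl f init := by
  intro ls
  induction ls with
  | nil => intro init; rfl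
  | cons x t ih =>
    intro init
    rw [List.foldl_cons, List.flatMap_cons, List.foldl_append, ih]

theorem pvA_eq (grid : List (List Int)) :
    solve_ce22a75a grid
      = (pvAnchors grid).foldl pvFill (pvOut0 grid.length (grid.getD 0 []).length) := by
  unfold solve_ce22a75a pvAnchors pvOut0
  rw [← pvFoldl_foldl_eq_foldl_flatMap]
  apply PySem.List.foldl_congr_mem
  intro out r _
  rw [PySem.List.foldl_ite_eq_foldl_filter]
  exact (List.foldl_map (f := fun c => ((r / 3) * 3, (c / 3) * 3)) (g := pvFill)).symm

theorem pvAnchors_bounds {grid : List (List Int)} (hpre : Pre_solve_ce22a75a grid) :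
    ∀ p ∈ pvAnchors grid,
      p.1 + 3 ≤ grid.length ∧ p.2 + 3 ≤ (grid.getD 0 []).length := by
  intro p hp
  unfold pvAnchors at hp
  simp only [List.mem_flatMap, List.mem_map, List.mem_filter, List.mem_range,
    decide_eq_true_eq] at hp
  obtain ⟨r, hr, c, ⟨hc, h5⟩, rfl⟩ := hp
  exact hpre.2.2 r hr c hc h5

-- B's flag entry for the block of (a, b) decides the anchor-cover condition
theorem pvFlag_iff (grid : List (List Int)) (a b : Nat)
    (ha : a < grid.length) (hb : b < (grid.getD 0 []).length) :
    (((List.range' (a / 3 * 3) (min (a / 3 * 3 + 3) grid.length - a / 3 * 3)).any (fun r =>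
        (List.range' (b / 3 * 3) (min (b / 3 * 3 + 3) (grid.getD 0 []).length - b / 3 * 3)).any
          (fun c => (grid.getD r []).getD c 0 == 5))) = true)
      ↔ (∃ p ∈ pvAnchors grid, pvCover p a b) := by
  unfold pvAnchors
  simp only [List.any_eq_true, List.mem_range', List.mem_flatMap, List.mem_map, List.mem_filter,
    List.mem_range, decide_eq_true_eq, beq_iff_eq]
  constructor
  · rintro ⟨r, ⟨i, hi, rfl⟩, c, ⟨j, hj, rfl⟩, h5⟩
    exact ⟨_, ⟨a / 3 * 3 + 1 * i, by omega, b / 3 * 3 + 1 * j, ⟨by omega, h5⟩, rfl⟩,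
      by omega, by omega, by omega, by omega⟩
  · rintro ⟨p, ⟨r, hr, c, ⟨hc, h5⟩, rfl⟩, h1, h2, h3, h4⟩
    simp only at h1 h2 h3 h4
    exact ⟨r, ⟨r - a / 3 * 3, by omega, by omega⟩, c, ⟨c - b / 3 * 3, by omega, by omega⟩, h5⟩

theorem pvCell_map_range (H : Nat) (f : Nat → List Int) {a : Nat} (ha : a < H) (b : Nat) :
    pvCell ((List.range H).map f) a b = (f a)[b]? := by
  simp [pvCell, ha]

theorem pvGet?_map_range {α : Type} (W : Nat) (g : Nat → α) {b : Nat} (hb : b < W) :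
    ((List.range W).map g)[b]? = some (g b) := by
  simp [hb]

theorem pvGetD_map_range {α : Type} (H : Nat) (f : Nat → α) {a : Nat} (ha : a < H) (d : α) :
    ((List.range H).map f).getD a d = f a := by
  simp [List.getD_eq_getElem?_getD, ha]

theorem pvB_unfold (grid : List (List Int)) :
    solve_ce22a75a_alt grid
      = (List.range grid.length).map (fun r =>
          (List.range (grid.getD 0 []).length).map (fun c =>
            if (((List.range ((grid.length + 2) / 3)).map (fun i =>
                (List.range (((grid.getD 0 []).length + 2) / 3)).map (fun j =>
                  (List.range' (i * 3) (min (i * 3 + 3) grid.length - i * 3)).any (fun r =>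
                    (List.range' (j * 3)
                        (min (j * 3 + 3) (grid.getD 0 []).length - j * 3)).any (fun c =>
                      (grid.getD r []).getD c 0 == 5))))).getD (r / 3) []).getD (c / 3) false
            then (1 : Int) else 0)) := rfl

theorem pvB_cell (grid : List (List Int)) (a b : Nat)
    (ha : a < grid.length) (hb : b < (grid.getD 0 []).length) :
    pvCell (solve_ce22a75a_alt grid) a b
      = some (if ∃ p ∈ pvAnchors grid, pvCover p a b then 1 else 0) := by
  rw [pvB_unfold, pvCell_map_range _ _ ha, pvGet?_map_range _ _ hb,
      pvGetD_map_range _ _ (show a / 3 < (grid.length + 2) / 3 by omega),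
      pvGetD_map_range _ _ (show b / 3 < ((grid.getD 0 []).length + 2) / 3 by omega)]
  by_cases h : ∃ p ∈ pvAnchors grid, pvCover p a b
  · rw [if_pos ((pvFlag_iff grid a b ha hb).mpr h), if_pos h]
  · rw [if_neg (fun hx => h ((pvFlag_iff grid a b ha hb).mp hx)), if_neg h]

theorem pvB_shape (grid : List (List Int)) :
    pvShape (solve_ce22a75a_alt grid) grid.length (grid.getD 0 []).length := by
  constructor
  · simp [pvB_unfold]
  · intro a row hrow
    rw [pvB_unfold, List.getElem?_map] at hrow
    cases h : (List.range grid.length)[a]? with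
    | none => rw [h] at hrow; simp at hrow
    | some v => rw [h] at hrow; simp at hrow; rw [← hrow]; simp

theorem pvEq_of_cell {g1 g2 : List (List Int)} (hlen : g1.length = g2.length)
    (hc : ∀ a b, pvCell g1 a b = pvCell g2 a b) : g1 = g2 := by
  apply List.ext_getElem?
  intro a
  cases h1 : g1[a]? with
  | none =>
    have h2 : g2.length ≤ a := hlen ▸ List.getElem?_eq_none_iff.mp h1
    exact (List.getElem?_eq_none_iff.mpr h2).symm
  | some r1 =>
    cases h2 : g2[a]? with
    | none =>
      obtain ⟨ha1, -⟩ := List.getElem?_eq_some_iff.mp h1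
      have := List.getElem?_eq_none_iff.mp h2
      omega
    | some r2 =>
      congr 1
      apply List.ext_getElem?
      intro b
      have := hc a b
      rw [pvCell, pvCell, h1, h2] at this
      simpa using this

theorem pvCell_none_of_ge {g : List (List Int)} {H W : Nat} (hs : pvShape g H W) (a b : Nat)
    (h : ¬ (a < H ∧ b < W)) : pvCell g a b = none := by
  have hlen := hs.1
  unfold pvCell
  cases hg : g[a]? with
  | none => simp
  | some r =>
    obtain ⟨ha, -⟩ := List.getElem?_eq_some_iff.mp hg
    have hrw := hs.2 a r hg
    simp only [Option.bind_eq_bind, Option.bind_some]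
    exact List.getElem?_eq_none_iff.mpr (by omega)

theorem pvOut0_cell (H W : Nat) {a b : Nat} (ha : a < H) (hb : b < W) :
    pvCell (pvOut0 H W) a b = some 0 := by
  unfold pvOut0
  rw [pvCell_map_range _ _ ha]
  simp [hb]

-- ===== VERDICT (by name: the statement is the Claim_ definition above) =====
theorem solve_ce22a75a_spec : Claim_equal_solve_ce22a75a := by
  intro grid _ hpre
  unfold Spec_solve_ce22a75a
  rw [pvA_eq]
  have hs0 := pvShape_out0 grid.length (grid.getD 0 []).length
  have hbA := pvAnchors_bounds hpre
  have hsA := pvFoldl_fill_shape (L := pvAnchors grid) hs0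
  have hsB := pvB_shape grid
  apply pvEq_of_cell
  · exact hsA.1.trans hsB.1.symm
  · intro a b
    rw [pvFoldl_fill_cell hs0 hbA a b]
    by_cases hab : a < grid.length ∧ b < (grid.getD 0 []).length
    · rw [pvB_cell grid a b hab.1 hab.2]
      by_cases h : ∃ p ∈ pvAnchors grid, pvCover p a b
      · rw [if_pos h, if_pos h]
      · rw [if_neg h, if_neg h, pvOut0_cell _ _ hab.1 hab.2]
    · rw [pvCell_none_of_ge hsB a b hab]
      have h0 : pvCell (pvOut0 grid.length (grid.getD 0 []).length) a b = none :=
        pvCell_none_of_ge hs0 a b hab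
      by_cases h : ∃ p ∈ pvAnchors grid, pvCover p a b
      · exfalso
        obtain ⟨p, hp, hcov⟩ := h
        have := hbA p hp
        obtain ⟨h1, h2, h3, h4⟩ := hcov
        omega
      · rw [if_neg h, h0]
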